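-- pv_equiv track=rewrite | github.com/kokukalli/haust12org | vor13/SoftDev/v1.py | xsort
-- ===== SOURCE A (Python) =====
-- def xsort(str1):
--
-- 	p2 = str1
-- 	p2.sort()
-- 	# str.startswith('x')
-- 	new = []
-- 	delList = []
-- 	for x in range(len(p2)):
-- 		if p2[x].startswith('x') or p2[x].startswith('X'):
-- 			new.append(p2[x])
-- 			delList.append(x)
--
-- 	for i in range(len(delList)):
-- 		del p2[delList[i]]
-- 		p2.reverse()
-- 		p2.append(new[i])
-- 		p2.reverse()
-- 	return new + p2
-- ===== SOURCE B (Python) =====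
-- def xsort(str1):
--     # Note: A sorts/mutates str1 in place; B leaves it untouched.
--     # Return value is reproduced exactly (incl. A's duplication of the
--     # x/X-words, which is its documented behaviour here).
--     s = sorted(str1)
--     new = [w for w in s if w.startswith(('x', 'X'))]
--     rest = [w for w in s if not w.startswith(('x', 'X'))]
--     return new + new[::-1] + rest
-- ===== Notes on version B (the rewrite author's own statement) =====
-- stated objective: simpler
-- what changed: A's second pass repeatedly deletes at a stored index and prepends via two full list reversals per x-word; B drops that loop entirely and returns the closed-form partition new + reversed(new) + rest of the sorted list (A's in-place mutation of the argument is not reproduced; the return value is identical).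
import Mathlib
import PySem

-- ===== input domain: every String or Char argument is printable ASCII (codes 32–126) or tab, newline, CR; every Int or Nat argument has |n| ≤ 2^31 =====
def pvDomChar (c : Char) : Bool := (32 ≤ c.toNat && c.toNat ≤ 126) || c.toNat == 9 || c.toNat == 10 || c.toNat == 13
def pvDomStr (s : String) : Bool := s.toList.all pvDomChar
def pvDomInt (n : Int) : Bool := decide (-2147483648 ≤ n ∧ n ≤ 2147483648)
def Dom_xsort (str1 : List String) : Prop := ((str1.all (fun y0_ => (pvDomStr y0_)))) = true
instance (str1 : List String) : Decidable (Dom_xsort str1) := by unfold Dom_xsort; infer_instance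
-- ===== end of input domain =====

-- B replaces A's delete/reverse/prepend loop by a closed-form partition of the sorted list
-- (the loop provably leaves reversed(new) ++ rest); return value only — A also sorts/mutates
-- its argument in place, B does not.

-- ===== PORT A =====
def xsort (str1 : List String) : List String :=
  let p2 := PySem.List.sorted str1 (fun w => w) false
  let nd := (PySem.List.pyRange 0 (p2.length : Int) 1).foldl
    (fun (st : List String × List Int) x =>
      let w := PySem.List.pyGetD p2 x ""
      if PySem.Str.startswith w "x" || PySem.Str.startswith w "X" then
        (st.1 ++ [w], st.2 ++ [x])
      else st) ([], [])
  let new := nd.1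
  let delList := nd.2
  let p2 := (PySem.List.pyRange 0 (delList.length : Int) 1).foldl
    (fun p2 i =>
      let p2 := match PySem.List.pop? p2 (PySem.List.pyGetD delList i 0) with
        | some r => r.2
        | none => p2        -- unreachable: every stored index is in range (proved below)
      let p2 := p2.reverse
      let p2 := p2 ++ [PySem.List.pyGetD new i ""]
      p2.reverse) p2
  new ++ p2

-- ===== PORT B =====
def xsort_alt (str1 : List String) : List String :=
  let s := PySem.List.sorted str1 (fun w => w) false
  let new := s.filter (fun w => PySem.Str.startswith w "x" || PySem.Str.startswith w "X")
  let rest := s.filter (fun w => !(PySem.Str.startswith w "x" || PySem.Str.startswith w "X"))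
  new ++ new.reverse ++ rest

-- ===== PRECONDITION & SPEC =====
def Spec_xsort (str1 : List String) (out : List String) : Prop := out = xsort_alt str1
instance (str1 : List String) (out : List String) : Decidable (Spec_xsort str1 out) := by unfold Spec_xsort; infer_instance

-- ===== CLAIM (what is proved, stated in full; the proofs are below) =====
def Claim_equal_xsort : Prop := ∀ (str1 : List String), Dom_xsort str1 → Spec_xsort str1 (xsort str1)

-- ===== LEMMAS AND PROOFS =====

-- indices (offset by k) of the p-elements of a list, as A's first loop records them
def pvIdxs (p : String → Bool) (k : Int) : List String → List Int
  | [] => []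
  | h :: t => if p h then k :: pvIdxs p (k+1) t else pvIdxs p (k+1) t

theorem pvIdxs_length (p : String → Bool) (k : Int) (s : List String) :
    (pvIdxs p k s).length = (s.filter p).length := by
  induction s generalizing k with
  | nil => rfl
  | cons h t ih =>
    by_cases hp : p h <;> simp [pvIdxs, hp, ih]

-- A's first loop: collect the p-elements and their (offset) indices
theorem pvFirst (p : String → Bool) (s : List String) (j : Int) (a : List String) (b : List Int) :
    (List.range s.length).foldl
      (fun (st : List String × List Int) k =>
        if p (s.getD k "") then (st.1 ++ [s.getD k ""], st.2 ++ [j + (k : Int)]) else st) (a, b)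
    = (a ++ s.filter p, b ++ pvIdxs p j s) := by
  induction s generalizing j a b with
  | nil => simp [pvIdxs]
  | cons h t ih =>
    rw [List.length_cons, List.range_succ_eq_map, List.foldl_cons, List.foldl_map]
    have hfun : (fun (st : List String × List Int) k =>
        if p ((h :: t).getD (k+1) "") then
          (st.1 ++ [(h :: t).getD (k+1) ""], st.2 ++ [j + ((k+1 : Nat) : Int)]) else st)
      = (fun (st : List String × List Int) k =>
        if p (t.getD k "") then (st.1 ++ [t.getD k ""], st.2 ++ [(j+1) + (k : Int)]) else st) := by
      funext st k
      simp [add_comm, add_left_comm]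
    by_cases hp : p h
    · simp only [List.getD_cons_zero, hp, if_true, Nat.cast_zero, add_zero]
      rw [hfun, ih (j+1)]
      simp [hp, pvIdxs, List.append_assoc]
    · simp only [List.getD_cons_zero, hp, if_false, Bool.false_eq_true]
      rw [hfun, ih (j+1)]
      simp [hp, pvIdxs]

-- A's second loop: del at the recorded index + prepend leaves reversed(new) in front
theorem pvSecond (p : String → Bool) (s2 : List String) (front : List String) :
    (List.range (s2.filter p).length).foldl
      (fun p2 k =>
        ((match PySem.List.pop? p2 ((pvIdxs p (front.length : Int) s2).getD k 0) with
          | some r => r.2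
          | none => p2).reverse ++ [(s2.filter p).getD k ""]).reverse)
      (front ++ s2)
    = (s2.filter p).reverse ++ front ++ s2.filter (fun w => !p w) := by
  induction s2 generalizing front with
  | nil => simp
  | cons h t ih =>
    by_cases hp : p h
    · have hfil : (h :: t).filter p = h :: t.filter p := by simp [hp]
      rw [hfil, List.length_cons, List.range_succ_eq_map, List.foldl_cons, List.foldl_map]
      have hidx : pvIdxs p (front.length : Int) (h :: t)
          = (front.length : Int) :: pvIdxs p ((front.length : Int) + 1) t := by
        simp [pvIdxs, hp]
      have hlt : front.length < (front ++ h :: t).length := by simp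
      have hpop : PySem.List.pop? (front ++ h :: t) ((front.length : Nat) : Int)
          = some ((front ++ h :: t)[front.length], (front ++ h :: t).eraseIdx front.length) :=
        PySem.List.pop?_natCast (front ++ h :: t) front.length hlt
      have herase : ∀ (fr : List String), (fr ++ h :: t).eraseIdx fr.length = fr ++ t := by
        intro fr
        induction fr with
        | nil => simp
        | cons f fs ihf => simp [ihf]
      have hstep : ((match PySem.List.pop? (front ++ h :: t)
            ((pvIdxs p (front.length : Int) (h :: t)).getD 0 0) with
          | some r => r.2
          | none => front ++ h :: t).reverse ++ [(h :: t.filter p).getD 0 ""]).reverse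
          = (h :: front) ++ t := by
        rw [hidx]
        simp only [List.getD_cons_zero]
        rw [hpop, herase front]
        simp
      rw [hstep]
      have hfun : (fun (p2 : List String) (k : Nat) =>
          ((match PySem.List.pop? p2 ((pvIdxs p (front.length : Int) (h :: t)).getD (k+1) 0) with
            | some r => r.2
            | none => p2).reverse ++ [(h :: t.filter p).getD (k+1) ""]).reverse)
        = (fun (p2 : List String) (k : Nat) =>
          ((match PySem.List.pop? p2 ((pvIdxs p (((h :: front).length : Nat) : Int) t).getD k 0) with
            | some r => r.2
            | none => p2).reverse ++ [(t.filter p).getD k ""]).reverse) := by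
        funext p2 k
        have hlen : (((h :: front).length : Nat) : Int) = (front.length : Int) + 1 := by
          push_cast [List.length_cons]; ring
        rw [hidx, hlen]
        simp
      rw [hfun, ih (h :: front)]
      simp [hp, List.append_assoc]
    · have hfil : (h :: t).filter p = t.filter p := by simp [hp]
      have hidx : pvIdxs p (front.length : Int) (h :: t)
          = pvIdxs p (((front ++ [h]).length : Nat) : Int) t := by
        simp [pvIdxs, hp]
      have happ : front ++ h :: t = (front ++ [h]) ++ t := by simp
      rw [hfil, hidx, happ, ih (front ++ [h])]
      simp [hp, List.append_assoc]

-- the two loops of A, instantiated at the x/X test and bridged from pyRange to List.range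
theorem pvLoop1 (s : List String) :
    (PySem.List.pyRange 0 (s.length : Int) 1).foldl
      (fun (st : List String × List Int) x =>
        if PySem.Str.startswith (PySem.List.pyGetD s x "") "x"
            || PySem.Str.startswith (PySem.List.pyGetD s x "") "X" then
          (st.1 ++ [PySem.List.pyGetD s x ""], st.2 ++ [x])
        else st) ([], [])
    = (s.filter (fun w => PySem.Str.startswith w "x" || PySem.Str.startswith w "X"),
       pvIdxs (fun w => PySem.Str.startswith w "x" || PySem.Str.startswith w "X") 0 s) := by
  rw [PySem.List.pyRange_one, List.foldl_map]
  have hn : ((s.length : Int) - 0).toNat = s.length := by omega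
  rw [hn]
  simpa using pvFirst (fun w => PySem.Str.startswith w "x" || PySem.Str.startswith w "X") s 0 [] []

theorem pvLoop2 (s : List String) :
    (PySem.List.pyRange 0
        (((pvIdxs (fun w => PySem.Str.startswith w "x" || PySem.Str.startswith w "X") 0 s).length : Nat) : Int) 1).foldl
      (fun (p2 : List String) i =>
        ((match PySem.List.pop? p2
              (PySem.List.pyGetD (pvIdxs (fun w => PySem.Str.startswith w "x" || PySem.Str.startswith w "X") 0 s) i 0) with
          | some r => r.2
          | none => p2).reverse
          ++ [PySem.List.pyGetD (s.filter (fun w => PySem.Str.startswith w "x" || PySem.Str.startswith w "X")) i ""]).reverse) s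
    = (s.filter (fun w => PySem.Str.startswith w "x" || PySem.Str.startswith w "X")).reverse
      ++ s.filter (fun w => !(PySem.Str.startswith w "x" || PySem.Str.startswith w "X")) := by
  rw [pvIdxs_length, PySem.List.pyRange_one, List.foldl_map]
  have hn : (((s.filter (fun w => PySem.Str.startswith w "x" || PySem.Str.startswith w "X")).length : Int) - 0).toNat
      = (s.filter (fun w => PySem.Str.startswith w "x" || PySem.Str.startswith w "X")).length := by omega
  rw [hn]
  simpa using pvSecond (fun w => PySem.Str.startswith w "x" || PySem.Str.startswith w "X") s []

-- ===== VERDICT (by name: the statement is the Claim_ definition above) =====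
theorem xsort_spec : Claim_equal_xsort := by
  intro str1 _
  unfold Spec_xsort xsort xsort_alt
  simp only []
  rw [pvLoop1]
  simp only []
  rw [pvLoop2]
  rw [List.append_assoc]
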